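-- pv_equiv track=rewrite | github.com/CTRuffing/BassConnectionsFireinmysoul | CatchmentCalculations.py | get_hospital_status_at_date
-- ===== SOURCE A (Python) =====
-- def get_hospital_status_at_date(hospital_intervals, hospital_name, date):
--     """
--     Get the status of a hospital at a given date.
--     Returns "Open" or "Closed".
--     """
--     if hospital_name not in hospital_intervals:
--         return "Closed"
--
--     changes = hospital_intervals[hospital_name]
--     last_status = "Open"  # Default to open if no changes before this date
--
--     for dt, typ in changes:
--         if dt <= date:
--             last_status = typ
--         else:
--             break
--
--     return last_status
-- ===== SOURCE B (Python) =====
-- def get_hospital_status_at_date(hospital_intervals, hospital_name, date):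
--     """
--     Get the status of a hospital at a given date.
--     Returns "Open" or "Closed".
--     """
--     changes = hospital_intervals.get(hospital_name)
--     if changes is None:
--         return "Closed"
--     # Binary search (bisect_right by hand) for the number of changes with dt <= date;
--     # correct because change-points are chronologically sorted.
--     lo, hi = 0, len(changes)
--     while lo < hi:
--         mid = (lo + hi) // 2
--         if changes[mid][0] <= date:
--             lo = mid + 1
--         else:
--             hi = mid
--     return changes[lo - 1][1] if lo else "Open"
-- ===== Notes on version B (the rewrite author's own statement) =====
-- stated objective: alternative
-- what changed: B replaces A's linear accumulator scan with a hand-rolled bisect_right binary search locating the last change with dt <= date, valid because change-points are chronological (Pre_ requires the looked-up list sorted by date).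
-- outside the precondition, e.g. on get_hospital_status_at_date({'h': [(5, 'Open'), (0, 'Closed')]}, 'h', 3): A returns 'Open', B returns 'Closed'
import Mathlib
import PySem

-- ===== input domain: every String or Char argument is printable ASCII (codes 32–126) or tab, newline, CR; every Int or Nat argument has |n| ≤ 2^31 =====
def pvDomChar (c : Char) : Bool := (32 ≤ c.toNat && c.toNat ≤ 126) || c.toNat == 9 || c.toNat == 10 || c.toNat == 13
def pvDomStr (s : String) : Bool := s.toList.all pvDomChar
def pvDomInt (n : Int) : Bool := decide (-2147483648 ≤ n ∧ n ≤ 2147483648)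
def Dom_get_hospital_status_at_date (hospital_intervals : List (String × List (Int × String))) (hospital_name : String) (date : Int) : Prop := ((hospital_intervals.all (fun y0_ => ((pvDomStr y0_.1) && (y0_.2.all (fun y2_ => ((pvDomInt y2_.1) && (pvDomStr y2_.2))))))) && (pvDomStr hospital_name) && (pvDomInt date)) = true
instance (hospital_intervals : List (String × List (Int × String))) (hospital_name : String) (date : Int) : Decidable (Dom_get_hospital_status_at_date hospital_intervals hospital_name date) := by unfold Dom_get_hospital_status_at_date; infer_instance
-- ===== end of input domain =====

-- B: binary search (hand-rolled bisect_right) for the last change with dt <= date, instead of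
-- A's linear scan; exact on Pre_ (the looked-up change list sorted nondecreasingly by date).
-- Pre_ excludes inputs whose looked-up change list is NOT chronologically sorted: there A's
-- early-break scan result is an order-dependent accident unusable by a different algorithm.

-- ===== PORT A =====
-- 'for dt, typ in changes: if dt <= date: last_status = typ else: break'
def pvALoop (date : Int) : List (Int × String) → String → String
  | [], last => last
  | (dt, typ) :: rest, last => if dt ≤ date then pvALoop date rest typ else last

def get_hospital_status_at_date (hospital_intervals : List (String × List (Int × String))) (hospital_name : String) (date : Int) : String :=
  -- 'hospital_name not in hospital_intervals' / 'hospital_intervals[hospital_name]'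
  match (PySem.Dict.mk hospital_intervals).get? hospital_name with
  | none => "Closed"
  | some changes => pvALoop date changes "Open"

-- ===== PORT B =====
-- 'while lo < hi: mid = (lo+hi)//2; if changes[mid][0] <= date: lo = mid+1 else: hi = mid'
-- (indices are Nat with 0 ≤ lo ≤ mid < hi ≤ len, so '//2' is Nat division and changes[mid] is
--  always in range; the getD default is unreachable)
def pvBS (changes : List (Int × String)) (date : Int) (lo hi : Nat) : Nat :=
  if _h : lo < hi then
    if (changes.getD ((lo + hi) / 2) (0, "")).1 ≤ date then pvBS changes date ((lo + hi) / 2 + 1) hi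
    else pvBS changes date lo ((lo + hi) / 2)
  else lo
termination_by hi - lo
decreasing_by all_goals omega

def get_hospital_status_at_date_alt (hospital_intervals : List (String × List (Int × String))) (hospital_name : String) (date : Int) : String :=
  -- 'changes = hospital_intervals.get(hospital_name); if changes is None: return "Closed"'
  match (PySem.Dict.mk hospital_intervals).get? hospital_name with
  | none => "Closed"
  | some changes =>
    -- 'lo, hi = 0, len(changes); while …'
    let lo := pvBS changes date 0 changes.length
    -- 'return changes[lo - 1][1] if lo else "Open"'  (index lo-1 always in range when lo > 0)
    if 0 < lo then (changes.getD (lo - 1) (0, "")).2 else "Open"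

-- ===== PRECONDITION & SPEC =====
-- Pre_ excludes inputs on which A still returns: those where the change list found for
-- hospital_name is not sorted nondecreasingly by date — change-points are chronological data,
-- and on unsorted lists A's early-break value is an accident of element order.
def Pre_get_hospital_status_at_date (hospital_intervals : List (String × List (Int × String))) (hospital_name : String) (date : Int) : Prop :=
  ∀ changes, (PySem.Dict.mk hospital_intervals).get? hospital_name = some changes →
    changes.Pairwise (fun p q => p.1 ≤ q.1)
instance (hospital_intervals : List (String × List (Int × String))) (hospital_name : String) (date : Int) : Decidable (Pre_get_hospital_status_at_date hospital_intervals hospital_name date) := by unfold Pre_get_hospital_status_at_date; infer_instance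

def pvWitness_get_hospital_status_at_date : (List (String × List (Int × String))) × String × Int :=
  ([("h", [(1, "Open"), (4, "Closed")])], "h", 3)

def Spec_get_hospital_status_at_date (hospital_intervals : List (String × List (Int × String))) (hospital_name : String) (date : Int) (out : String) : Prop := out = get_hospital_status_at_date_alt hospital_intervals hospital_name date
instance (hospital_intervals : List (String × List (Int × String))) (hospital_name : String) (date : Int) (out : String) : Decidable (Spec_get_hospital_status_at_date hospital_intervals hospital_name date out) := by unfold Spec_get_hospital_status_at_date; infer_instance

-- ===== CLAIM =====
def Claim_equal_get_hospital_status_at_date : Prop := ∀ (hospital_intervals : List (String × List (Int × String))) (hospital_name : String) (date : Int), Dom_get_hospital_status_at_date hospital_intervals hospital_name date → Pre_get_hospital_status_at_date hospital_intervals hospital_name date → Spec_get_hospital_status_at_date hospital_intervals hospital_name date (get_hospital_status_at_date hospital_intervals hospital_name date)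

-- ===== LEMMAS AND PROOFS =====

-- k abbreviates the boundary index changes.findIdx (date < ·.1): the number of leading changes
-- with dt ≤ date on a sorted list (the index of the first change with date < dt, or the length).

-- A's loop equals the boundary-index formulation (no sortedness needed: A only ever looks at the
-- prefix before the first change with date < dt).
theorem pvALoop_eq_boundary (date : Int) (changes : List (Int × String)) (last : String) :
    pvALoop date changes last =
      (if 0 < changes.findIdx (fun p => decide (date < p.1)) then
         (changes.getD (changes.findIdx (fun p => decide (date < p.1)) - 1) (0, "")).2
       else last) := by
  induction changes generalizing last with
  | nil => simp [pvALoop]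
  | cons hd rest ih =>
    obtain ⟨dt, typ⟩ := hd
    by_cases h : dt ≤ date
    · have hlt : ¬ date < dt := not_lt.mpr h
      rw [pvALoop, if_pos h, ih typ, List.findIdx_cons]
      simp only [hlt, decide_false, cond_false]
      cases hk : rest.findIdx (fun p => decide (date < p.1)) with
      | zero => simp
      | succ m => simp
    · have hlt : date < dt := not_le.mp h
      rw [pvALoop, if_neg h]
      simp [List.findIdx_cons, hlt]

-- On a sorted list, entries strictly below the boundary satisfy dt ≤ date …
theorem pv_below_boundary (date : Int) (changes : List (Int × String))
    (i : Nat) (hi : i < changes.length)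
    (h : i < changes.findIdx (fun p => decide (date < p.1))) :
    (changes[i]'hi).1 ≤ date := by
  have := List.not_of_lt_findIdx h
  simpa using this

-- … and entries at or above the boundary satisfy date < dt.
theorem pv_above_boundary (date : Int) (changes : List (Int × String))
    (hs : changes.Pairwise (fun p q => p.1 ≤ q.1))
    (i : Nat) (hi : i < changes.length)
    (h : changes.findIdx (fun p => decide (date < p.1)) ≤ i) :
    date < (changes[i]'hi).1 := by
  have hk : changes.findIdx (fun p => decide (date < p.1)) < changes.length := lt_of_le_of_lt h hi
  have hpk : date < (changes[changes.findIdx (fun p => decide (date < p.1))]'hk).1 := by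
    have := List.findIdx_getElem (w := hk)
    simpa using this
  rcases Nat.lt_or_ge (changes.findIdx (fun p => decide (date < p.1))) i with hlt | hge
  · exact lt_of_lt_of_le hpk ((List.pairwise_iff_getElem.mp hs) _ _ hk hi hlt)
  · have : i = changes.findIdx (fun p => decide (date < p.1)) := Nat.le_antisymm (by omega) h
    subst this; exact hpk

-- The binary search converges to the boundary index on a sorted list.
theorem pvBS_eq_boundary (date : Int) (changes : List (Int × String))
    (hs : changes.Pairwise (fun p q => p.1 ≤ q.1)) :
    ∀ (lo hi : Nat),
      lo ≤ changes.findIdx (fun p => decide (date < p.1)) →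
      changes.findIdx (fun p => decide (date < p.1)) ≤ hi →
      hi ≤ changes.length →
      pvBS changes date lo hi = changes.findIdx (fun p => decide (date < p.1)) := by
  intro lo hi
  induction lo, hi using pvBS.induct changes date with
  | case1 lo hi hlt hle ih =>
    intro h1 h2 h3
    rw [pvBS, dif_pos hlt, if_pos hle]
    have hm : (lo + hi) / 2 < changes.length := by omega
    have hg : changes.getD ((lo + hi) / 2) (0, "") = changes[(lo + hi) / 2]'hm :=
      List.getD_eq_getElem changes (0, "") hm
    have hmk : (lo + hi) / 2 < changes.findIdx (fun p => decide (date < p.1)) := by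
      by_contra hc
      have := pv_above_boundary date changes hs ((lo + hi) / 2) hm (by omega)
      rw [hg] at hle; omega
    exact ih (by omega) h2 h3
  | case2 lo hi hlt hgt ih =>
    intro h1 h2 h3
    rw [pvBS, dif_pos hlt, if_neg hgt]
    have hm : (lo + hi) / 2 < changes.length := by omega
    have hg : changes.getD ((lo + hi) / 2) (0, "") = changes[(lo + hi) / 2]'hm :=
      List.getD_eq_getElem changes (0, "") hm
    have hmk : changes.findIdx (fun p => decide (date < p.1)) ≤ (lo + hi) / 2 := by
      by_contra hc
      have := pv_below_boundary date changes ((lo + hi) / 2) hm (by omega)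
      rw [hg] at hgt; omega
    exact ih h1 hmk (by omega)
  | case3 lo hi hge =>
    intro h1 h2 h3
    rw [pvBS, dif_neg hge]
    omega

-- ===== VERDICT =====
theorem get_hospital_status_at_date_spec : Claim_equal_get_hospital_status_at_date := by
  intro hi name date _ hpre
  unfold Spec_get_hospital_status_at_date get_hospital_status_at_date get_hospital_status_at_date_alt
  cases h : (PySem.Dict.mk hi).get? name with
  | none => rfl
  | some changes =>
    dsimp only
    rw [pvALoop_eq_boundary date changes "Open",
        pvBS_eq_boundary date changes (hpre changes h) 0 changes.length (Nat.zero_le _)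
          List.findIdx_le_length le_rfl]
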